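-- pv_equiv track=rewrite | github.com/pypi-data/pypi-mirror-256 | packages/pySCIL/pySCIL-0.0.12-py3-none-any.whl/scil/services/_taskFocus.py | removeTurnsWithGaps
-- ===== SOURCE A (Python) =====
-- gapSizeCutoff = 10
--
-- def removeTurnsWithGaps(mesoTopics):
--     gsc = gapSizeCutoff #shorten the name
--     for topic in mesoTopics:
--         i = 0
--         while i < len(mesoTopics[topic]):
--             if i > 0 and i < len(mesoTopics[topic])-1: # middle elements
--                 if (mesoTopics[topic][i] - mesoTopics[topic][i-1]) > gsc and \
--                     (mesoTopics[topic][i+1] - mesoTopics[topic][i]) > gsc: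
--                     mesoTopics[topic].pop(i)
--                     i -= 1
--             elif i == len(mesoTopics[topic])-1 and len(mesoTopics[topic]) > 1: # last element
--                 if (mesoTopics[topic][i] - mesoTopics[topic][i-1]) > gsc:
--                     mesoTopics[topic].pop(i)
--             elif i == 0 and len(mesoTopics[topic]) > 1: # first element
--                 if (mesoTopics[topic][i+1] - mesoTopics[topic][i]) > gsc:
--                     mesoTopics[topic].pop(i)
--                     i -= 1
--             i += 1
--     return mesoTopics
-- ===== SOURCE B (Python) =====
-- # One-pass rebuild: tracks the last kept value instead of repeated in-place pops.
-- # Return-value equivalence; A mutates each list in place, B rebinds mesoTopics[topic] to a new list.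
-- gapSizeCutoff = 10
--
-- def removeTurnsWithGaps(mesoTopics):
--     gsc = gapSizeCutoff
--     for topic in mesoTopics:
--         vals = mesoTopics[topic]
--         n = len(vals)
--         kept = []
--         for j, x in enumerate(vals):
--             if kept:
--                 if x - kept[-1] > gsc and (j + 1 == n or vals[j + 1] - x > gsc):
--                     continue
--             elif j + 1 < n and vals[j + 1] - x > gsc:
--                 continue
--             kept.append(x)
--         mesoTopics[topic] = kept
--     return mesoTopics
-- ===== Notes on version B (the rewrite author's own statement) =====
-- stated objective: alternative
-- what changed: Replaces A's in-place while loop with repeated list.pop(i) and index backtracking by a single forward pass per topic that rebuilds the list, tracking only the last kept value and one element of lookahead.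
import Mathlib
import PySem

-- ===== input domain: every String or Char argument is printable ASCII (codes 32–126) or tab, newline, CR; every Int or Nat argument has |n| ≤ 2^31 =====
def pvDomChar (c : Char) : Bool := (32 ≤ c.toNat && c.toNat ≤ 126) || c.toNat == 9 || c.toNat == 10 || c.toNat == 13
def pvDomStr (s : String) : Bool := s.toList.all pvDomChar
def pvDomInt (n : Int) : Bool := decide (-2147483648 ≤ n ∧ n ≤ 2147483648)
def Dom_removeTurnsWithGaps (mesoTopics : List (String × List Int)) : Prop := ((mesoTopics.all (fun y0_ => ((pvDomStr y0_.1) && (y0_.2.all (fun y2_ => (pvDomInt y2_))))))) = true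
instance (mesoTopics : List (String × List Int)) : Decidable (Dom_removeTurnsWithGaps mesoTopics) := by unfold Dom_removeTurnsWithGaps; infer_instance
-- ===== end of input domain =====

-- B replaces A's in-place pop/index-backtracking loop by a single forward pass that rebuilds
-- each topic's list while tracking the last kept value (objective: alternative; return-value
-- equivalence only — Python A mutates the dict's lists in place, B rebinds each key to a new list).


-- ===== PORT A =====
-- A's inner while loop over one topic's list: index i, in-place pops via eraseIdx,
-- the three position branches in A's order (middle / last / first); gsc = gapSizeCutoff = 10.
def pvLoopA (i : Nat) (l : List Int) : List Int :=
  if h : i < l.length then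
    if 0 < i ∧ i < l.length - 1 then
      if l.getD i 0 - l.getD (i - 1) 0 > 10 ∧ l.getD (i + 1) 0 - l.getD i 0 > 10 then
        pvLoopA i (l.eraseIdx i)            -- pop(i); i -= 1; i += 1
      else pvLoopA (i + 1) l
    else if i = l.length - 1 ∧ 1 < l.length then
      if l.getD i 0 - l.getD (i - 1) 0 > 10 then pvLoopA (i + 1) (l.eraseIdx i)
      else pvLoopA (i + 1) l
    else if i = 0 ∧ 1 < l.length then
      if l.getD (i + 1) 0 - l.getD i 0 > 10 then pvLoopA 0 (l.eraseIdx 0)   -- pop(0); i -= 1; i += 1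
      else pvLoopA (i + 1) l
    else pvLoopA (i + 1) l
  else l
termination_by l.length - i
decreasing_by all_goals simp_all [List.length_eraseIdx] <;> omega

-- 'for topic in mesoTopics: … mesoTopics[topic] = …' over a dict (distinct keys,
-- insertion order) updates each key's value in place: a map over the association list.
def removeTurnsWithGaps (mesoTopics : List (String × List Int)) : List (String × List Int) :=
  mesoTopics.map (fun kv => (kv.1, pvLoopA 0 kv.2))

-- ===== PORT B =====
-- B's single pass: `last` is kept[-1] (none while kept is empty), one-element lookahead.
def pvLoopB : Option Int → List Int → List Int
  | _, [] => []
  | none, [x] => [x]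
  | none, x :: y :: rest =>
      if y - x > 10 then pvLoopB none (y :: rest) else x :: pvLoopB (some x) (y :: rest)
  | some p, [x] => if x - p > 10 then [] else [x]
  | some p, x :: y :: rest =>
      if x - p > 10 ∧ y - x > 10 then pvLoopB (some p) (y :: rest)
      else x :: pvLoopB (some x) (y :: rest)

def removeTurnsWithGaps_alt (mesoTopics : List (String × List Int)) : List (String × List Int) :=
  mesoTopics.map (fun kv => (kv.1, pvLoopB none kv.2))

-- ===== PRECONDITION & SPEC =====
def Spec_removeTurnsWithGaps (mesoTopics : List (String × List Int)) (out : List (String × List Int)) : Prop := out = removeTurnsWithGaps_alt mesoTopics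
instance (mesoTopics : List (String × List Int)) (out : List (String × List Int)) : Decidable (Spec_removeTurnsWithGaps mesoTopics out) := by unfold Spec_removeTurnsWithGaps; infer_instance

-- ===== CLAIM (what is proved, stated in full; the proofs are below) =====
def Claim_equal_removeTurnsWithGaps : Prop := ∀ (mesoTopics : List (String × List Int)), Dom_removeTurnsWithGaps mesoTopics → Spec_removeTurnsWithGaps mesoTopics (removeTurnsWithGaps mesoTopics)

-- ===== LEMMAS AND PROOFS =====

theorem pvLoopA_ge (i : Nat) (l : List Int) (h : l.length ≤ i) : pvLoopA i l = l := by
  rw [pvLoopA]; simp [Nat.not_lt.mpr h]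

theorem pvGetD_append_cons (pre : List Int) (x : Int) (suf : List Int) :
    (pre ++ x :: suf).getD pre.length 0 = x := by
  simp [List.getD]

theorem pvGetD_append_cons1 (pre : List Int) (x y : Int) (suf : List Int) :
    (pre ++ x :: y :: suf).getD (pre.length + 1) 0 = y := by
  have h := pvGetD_append_cons (pre ++ [x]) y suf
  simp only [List.append_assoc, List.cons_append, List.nil_append, List.length_append,
    List.length_cons, List.length_nil] at h
  exact h

theorem pvGetD_append_pred (pre : List Int) (p : Int) (h : pre.getLast? = some p)
    (suf : List Int) : (pre ++ suf).getD (pre.length - 1) 0 = p := by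
  obtain ⟨q, rfl⟩ := List.getLast?_eq_some_iff.mp h
  have hq : (q ++ [p]).length - 1 = q.length := by simp
  rw [List.append_assoc, hq]
  exact pvGetD_append_cons q p suf

theorem pvEraseIdx_append_cons (pre : List Int) (x : Int) (suf : List Int) :
    (pre ++ x :: suf).eraseIdx pre.length = pre ++ suf := by
  induction pre with
  | nil => simp
  | cons a t ih => simp [ih]

-- The invariant: at state (i = pre.length, l = pre ++ suf), A's loop leaves `pre`
-- untouched and filters `suf` exactly as B does with last-kept value pre.getLast?.
theorem pvKey : ∀ (n : Nat) (suf : List Int), suf.length ≤ n → ∀ (pre : List Int),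
    pvLoopA pre.length (pre ++ suf) = pre ++ pvLoopB pre.getLast? suf := by
  intro n
  induction n with
  | zero =>
    intro suf hs pre
    have : suf = [] := List.eq_nil_of_length_eq_zero (Nat.le_zero.mp hs)
    subst this
    simp [pvLoopB, pvLoopA_ge pre.length pre (le_refl _)]
  | succ n ih =>
    intro suf hs pre
    cases suf with
    | nil => simp [pvLoopB, pvLoopA_ge pre.length pre (le_refl _)]
    | cons x rest =>
      cases hpre : pre.getLast? with
      | none =>
        have hpre0 : pre = [] := by simpa using hpre
        subst hpre0
        simp only [List.length_nil, List.nil_append]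
        cases rest with
        | nil =>
          rw [pvLoopA]
          norm_num
          rw [pvLoopA_ge 1 [x] (by simp)]
          simp [pvLoopB]
        | cons y rest' =>
          rw [pvLoopA]
          rw [dif_pos (by simp)]
          rw [if_neg (by simp)]
          rw [if_neg (by simp)]
          rw [if_pos (by simp)]
          simp only [List.getD_cons_succ, List.getD_cons_zero, List.eraseIdx_cons_zero,
            Nat.zero_add]
          by_cases hc : y - x > 10
          · rw [if_pos hc]
            have := ih (y :: rest') (by simp only [List.length_cons] at hs ⊢; omega) []
            simpa [pvLoopB, hc] using this
          · rw [if_neg hc]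
            have h2 := ih (y :: rest') (by simp only [List.length_cons] at hs ⊢; omega) [x]
            simp only [List.singleton_append, List.length_cons, List.length_nil,
              List.getLast?_singleton, Nat.zero_add] at h2
            rw [h2]
            simp [pvLoopB, hc]
      | some p =>
        have hp0 : 0 < pre.length := by
          cases pre with
          | nil => simp at hpre
          | cons a t => simp
        have hgx : (pre ++ x :: rest).getD pre.length 0 = x := pvGetD_append_cons _ _ _
        have hgp : (pre ++ x :: rest).getD (pre.length - 1) 0 = p :=
          pvGetD_append_pred pre p hpre _
        have herase : (pre ++ x :: rest).eraseIdx pre.length = pre ++ rest :=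
          pvEraseIdx_append_cons _ _ _
        cases rest with
        | nil =>
          have hl : (pre ++ [x]).length = pre.length + 1 := by simp
          rw [pvLoopA]
          rw [dif_pos (by omega)]
          rw [if_neg (by omega)]
          rw [if_pos (by omega)]
          rw [hgx, hgp]
          by_cases hc : x - p > 10
          · rw [if_pos hc, herase]
            rw [pvLoopA_ge (pre.length + 1) (pre ++ []) (by simp)]
            simp [pvLoopB, hc]
          · rw [if_neg hc]
            rw [pvLoopA_ge (pre.length + 1) (pre ++ [x]) (by omega)]
            simp [pvLoopB, hc]
        | cons y rest' =>
          have hl : (pre ++ x :: y :: rest').length = pre.length + 2 + rest'.length := by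
            rw [List.length_append, List.length_cons, List.length_cons]; omega
          have hgy : (pre ++ x :: y :: rest').getD (pre.length + 1) 0 = y :=
            pvGetD_append_cons1 _ _ _ _
          rw [pvLoopA]
          rw [dif_pos (by omega)]
          rw [if_pos (by omega)]
          rw [hgx, hgp, hgy]
          by_cases hc : x - p > 10 ∧ y - x > 10
          · rw [if_pos hc, herase]
            rw [ih (y :: rest') (by simp only [List.length_cons] at hs ⊢; omega) pre]
            rw [hpre]
            simp [pvLoopB, hc.1, hc.2]
          · rw [if_neg hc]
            have h1 : pre ++ x :: y :: rest' = (pre ++ [x]) ++ y :: rest' := by simp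
            have h2 : pre.length + 1 = (pre ++ [x]).length := by simp
            rw [h1, h2, ih (y :: rest') (by simp only [List.length_cons] at hs ⊢; omega) (pre ++ [x])]
            rw [List.getLast?_concat]
            simp [pvLoopB, hc]

theorem pvLoop_eq (l : List Int) : pvLoopA 0 l = pvLoopB none l := by
  have := pvKey l.length l (le_refl _) []
  simpa using this

-- ===== VERDICT (by name: the statement is the Claim_ definition above) =====
theorem removeTurnsWithGaps_spec : Claim_equal_removeTurnsWithGaps := by
  intro mesoTopics _
  unfold Spec_removeTurnsWithGaps removeTurnsWithGaps removeTurnsWithGaps_alt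
  simp [pvLoop_eq]
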